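-- pv_equiv track=rewrite | github.com/xxlhacker/iifybot | utilities.py | iify_slack_output_formater
-- ===== SOURCE A (Python) =====
-- def iify_slack_output_formater(rhsa_parsed_results, list_of_cves):
--     """
--     Takes in the list of CVEs and parsed RHSA results and formats them to be displayed in Slack.
--
--     Args:
--         rhsa_parsed_results (list): List of parsed RHSA data
--         list_of_cves (list): List of User provided CVEs
--
--     Returns:
--         str: Returns parsed CVE results in a code block format for Slack.
--     """
--     return_str = ""
--     for cve in list_of_cves:
--         return_str += f"\n======================\n{cve}\n======================\n"
--         return_str += "```"
--         for results in rhsa_parsed_results: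
--             if cve in results:
--                 return_str += f"{results}"
--         return_str += "```"
--     return return_str
-- ===== SOURCE B (Python) =====
-- def iify_slack_output_formater(rhsa_parsed_results, list_of_cves):
--     """
--     Takes in the list of CVEs and parsed RHSA results and formats them to be displayed in Slack.
--
--     B: builds an index (one pass over the results, updating every matching CVE bucket),
--     then emits one block per CVE occurrence and joins the pieces once.
--     """
--     index = {cve: "" for cve in list_of_cves}
--     for results in rhsa_parsed_results:
--         for cve in index:
--             if cve in results:
--                 index[cve] += results
--     blocks = []
--     for cve in list_of_cves:
--         blocks.append(f"\n======================\n{cve}\n======================\n```{index[cve]}```")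
--     return "".join(blocks)
-- ===== Notes on version B (the rewrite author's own statement) =====
-- stated objective: faster
-- what changed: B inverts the loop nesting: it builds a dict index mapping each CVE to its accumulated matching results in a single pass over rhsa_parsed_results, then emits one block per CVE occurrence from the index and joins all pieces once, instead of A's rescan of all results for every CVE while repeatedly extending one ever-growing return string.
import Mathlib
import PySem

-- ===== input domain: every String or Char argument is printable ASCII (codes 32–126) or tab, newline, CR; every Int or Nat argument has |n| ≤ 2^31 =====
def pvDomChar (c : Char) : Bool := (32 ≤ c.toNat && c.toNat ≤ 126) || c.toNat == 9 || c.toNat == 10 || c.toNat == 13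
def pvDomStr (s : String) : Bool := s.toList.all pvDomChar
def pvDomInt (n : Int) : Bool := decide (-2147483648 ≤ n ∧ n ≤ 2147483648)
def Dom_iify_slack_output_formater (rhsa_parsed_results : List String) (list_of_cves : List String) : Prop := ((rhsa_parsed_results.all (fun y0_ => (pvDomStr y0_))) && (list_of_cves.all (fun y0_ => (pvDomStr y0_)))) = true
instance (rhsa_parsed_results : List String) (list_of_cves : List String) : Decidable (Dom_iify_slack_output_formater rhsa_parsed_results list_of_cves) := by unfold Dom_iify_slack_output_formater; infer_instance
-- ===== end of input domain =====

-- B builds a CVE→matches index in one pass over the results instead of rescanning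
-- all results for every CVE, then joins the per-CVE blocks once (alternative decomposition).


-- ===== PORT A =====
-- Literal port of A: outer loop over list_of_cves, inner rescan of rhsa_parsed_results.
def iify_slack_output_formater (rhsa_parsed_results : List String) (list_of_cves : List String) : String :=
  list_of_cves.foldl (fun return_str cve =>
    let return_str := return_str ++ ("\n======================\n" ++ cve ++ "\n======================\n")
    let return_str := return_str ++ "```"
    let return_str := rhsa_parsed_results.foldl
      (fun return_str results => if PySem.Str.isIn cve results then return_str ++ results else return_str)
      return_str
    return_str ++ "```") ""

-- ===== PORT B =====
-- Literal port of B: index = {cve: "" for cve in list_of_cves}; one pass over results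
-- updating every matching bucket ("for cve in index" = fold over the dict's keys);
-- then one block per CVE occurrence, joined once.
def iify_slack_output_formater_alt (rhsa_parsed_results : List String) (list_of_cves : List String) : String :=
  let index : PySem.Dict String String :=
    list_of_cves.foldl (fun d cve => d.insert cve "") PySem.Dict.empty
  let index := rhsa_parsed_results.foldl (fun d results =>
    d.keys.foldl (fun d cve =>
      if PySem.Str.isIn cve results then d.modify cve "" (· ++ results) else d) d) index
  let blocks := list_of_cves.map (fun cve =>
    "\n======================\n" ++ cve ++ "\n======================\n```" ++ index.getD cve "" ++ "```")
  PySem.Str.join "" blocks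

-- ===== PRECONDITION & SPEC =====
def Spec_iify_slack_output_formater (rhsa_parsed_results : List String) (list_of_cves : List String) (out : String) : Prop := out = iify_slack_output_formater_alt rhsa_parsed_results list_of_cves
instance (rhsa_parsed_results : List String) (list_of_cves : List String) (out : String) : Decidable (Spec_iify_slack_output_formater rhsa_parsed_results list_of_cves out) := by unfold Spec_iify_slack_output_formater; infer_instance

-- ===== CLAIM (what is proved, stated in full; the proofs are below) =====
def Claim_equal_iify_slack_output_formater : Prop := ∀ (rhsa_parsed_results : List String) (list_of_cves : List String), Dom_iify_slack_output_formater rhsa_parsed_results list_of_cves → Spec_iify_slack_output_formater rhsa_parsed_results list_of_cves (iify_slack_output_formater rhsa_parsed_results list_of_cves)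

-- ===== LEMMAS AND PROOFS =====

/-- The string of matching results for one CVE (A's inner loop from the empty string). -/
def pvMatch (rhsa_parsed_results : List String) (cve : String) : String :=
  rhsa_parsed_results.foldl
    (fun a results => if PySem.Str.isIn cve results then a ++ results else a) ""

lemma pvMatch_acc (rs : List String) (cve : String) (a : String) :
    rs.foldl (fun a results => if PySem.Str.isIn cve results then a ++ results else a) a
      = a ++ pvMatch rs cve := by
  induction rs generalizing a with
  | nil => simp [pvMatch]
  | cons r rest ih =>
    simp only [pvMatch, List.foldl_cons]
    rw [ih, ih (if PySem.Str.isIn cve r then "" ++ r else "")]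
    split_ifs <;> simp [String.append_assoc]

lemma pvMatch_cons (r : String) (rest : List String) (cve : String) :
    pvMatch (r :: rest) cve
      = (if PySem.Str.isIn cve r then "" ++ r else "") ++ pvMatch rest cve := by
  simp only [pvMatch, List.foldl_cons]
  rw [pvMatch_acc]
  rfl

/-- B's inner key loop: effect on any bucket's value (for a Nodup key list). -/
lemma pvInner_getD (r : String) (ks : List String) (hk : ks.Nodup)
    (d : PySem.Dict String String) (x : String) :
    (ks.foldl (fun d cve =>
        if PySem.Str.isIn cve r then d.modify cve "" (· ++ r) else d) d).getD x ""
      = if x ∈ ks ∧ PySem.Str.isIn x r then d.getD x "" ++ r else d.getD x "" := by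
  induction ks generalizing d with
  | nil => simp
  | cons k rest ih =>
    have hkr : k ∉ rest := (List.nodup_cons.mp hk).1
    have hrest : rest.Nodup := (List.nodup_cons.mp hk).2
    rw [List.foldl_cons]
    by_cases hin : PySem.Str.isIn k r = true
    · rw [if_pos hin, ih hrest]
      simp only [PySem.Dict.getD_modify]
      by_cases hx : x = k
      · subst hx
        rw [if_neg (fun hc : _ ∧ _ => hkr hc.1), if_pos rfl,
          if_pos ⟨List.mem_cons_self .., hin⟩]
      · rw [if_neg hx]
        simp only [List.mem_cons, hx, false_or]
    · rw [if_neg hin, ih hrest]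
      by_cases hx : x = k
      · subst hx
        rw [if_neg (fun hc : _ ∧ _ => hkr hc.1), if_neg (fun hc : _ ∧ _ => hin hc.2)]
      · simp only [List.mem_cons, hx, false_or]

/-- B's inner key loop keeps the key list unchanged when it only touches existing keys. -/
lemma pvInner_keys (r : String) (ks : List String)
    (d : PySem.Dict String String) (hks : ∀ k ∈ ks, k ∈ d.keys) :
    (ks.foldl (fun d cve =>
        if PySem.Str.isIn cve r then d.modify cve "" (· ++ r) else d) d).keys = d.keys := by
  induction ks generalizing d with
  | nil => rfl
  | cons k rest ih =>
    simp only [List.foldl_cons]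
    by_cases hin : PySem.Str.isIn k r = true
    · have hkd : k ∈ d.keys := hks k (List.mem_cons_self ..)
      have hkeys : (d.modify k "" (· ++ r)).keys = d.keys := by
        rw [PySem.Dict.keys_modify, PySem.Dict.keys_insert_of_contains]
        rw [PySem.Dict.contains_iff_mem_keys]; exact hkd
      rw [if_pos hin, ih _ (fun k' hk' => by rw [hkeys]; exact hks k' (List.mem_cons_of_mem _ hk')), hkeys]
    · simp only [Bool.not_eq_true] at hin
      simp only [hin, Bool.false_eq_true, if_false]
      exact ih _ (fun k' hk' => hks k' (List.mem_cons_of_mem _ hk'))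

/-- B's outer result loop: each bucket accumulates exactly its matching results, in order. -/
lemma pvOuter_getD (rs : List String) (d : PySem.Dict String String)
    (hnd : d.keys.Nodup) (x : String) (hx : x ∈ d.keys) :
    (rs.foldl (fun d results =>
        d.keys.foldl (fun d cve =>
          if PySem.Str.isIn cve results then d.modify cve "" (· ++ results) else d) d) d).getD x ""
      = d.getD x "" ++ pvMatch rs x := by
  induction rs generalizing d with
  | nil => simp [pvMatch]
  | cons r rest ih =>
    simp only [List.foldl_cons]
    have hkeys := pvInner_keys r d.keys d (fun _ h => h)
    rw [ih _ (by rw [hkeys]; exact hnd) (by rw [hkeys]; exact hx)]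
    rw [pvInner_getD r d.keys hnd d x, pvMatch_cons]
    by_cases hin : PySem.Str.isIn x r = true
    · rw [if_pos (⟨hx, hin⟩ : _ ∧ _), if_pos hin, String.empty_append, String.append_assoc]
    · rw [if_neg (fun hc : _ ∧ _ => hin hc.2), if_neg hin, String.empty_append]

/-- The initial comprehension dict: every bucket reads as the empty string. -/
lemma pvInit_getD (cves : List String) (d : PySem.Dict String String) (x : String)
    (hd : d.getD x "" = "") :
    (cves.foldl (fun d cve => d.insert cve "") d).getD x "" = "" := by
  induction cves generalizing d with
  | nil => exact hd
  | cons c rest ih =>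
    simp only [List.foldl_cons]
    refine ih _ ?_
    rw [PySem.Dict.getD_insert]
    split_ifs <;> simp [hd]

lemma pvJoin_empty_cons (s : String) (l : List String) :
    PySem.Str.join "" (s :: l) = s ++ PySem.Str.join "" l := by
  apply String.toList_inj.mp
  simp only [PySem.Str.toList_join, List.map_cons, String.toList_append]
  cases l <;> simp [PySem.Chars.join, List.intercalate]

lemma pvA_acc (rs cves : List String) (a : String) :
    cves.foldl (fun return_str cve =>
      let return_str := return_str ++ ("\n======================\n" ++ cve ++ "\n======================\n")
      let return_str := return_str ++ "```"
      let return_str := rs.foldl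
        (fun return_str results => if PySem.Str.isIn cve results then return_str ++ results else return_str)
        return_str
      return_str ++ "```") a
    = a ++ PySem.Str.join "" (cves.map (fun cve =>
        "\n======================\n" ++ cve ++ "\n======================\n```" ++ pvMatch rs cve ++ "```")) := by
  induction cves generalizing a with
  | nil => simp [PySem.Str.join, PySem.Chars.join, List.intercalate]
  | cons c rest ih =>
    simp only [List.foldl_cons, List.map_cons]
    rw [ih, pvMatch_acc, pvJoin_empty_cons]
    simp [String.append_assoc]

-- ===== VERDICT (by name: the statement is the Claim_ definition above) =====
theorem iify_slack_output_formater_spec : Claim_equal_iify_slack_output_formater := by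
  intro rs cves _
  unfold Spec_iify_slack_output_formater iify_slack_output_formater iify_slack_output_formater_alt
  rw [pvA_acc]
  have hkeys : (cves.foldl (fun d cve => d.insert cve "") (PySem.Dict.empty : PySem.Dict String String)).keys
      = PySem.Set.ofList cves := by
    rw [PySem.Dict.keys_foldl_insert cves (fun _ _ => "")]
    simp [PySem.Set.update, PySem.Set.ofList_eq_foldl]
  have hnd : (cves.foldl (fun d cve => d.insert cve "") (PySem.Dict.empty : PySem.Dict String String)).keys.Nodup :=
    PySem.Dict.nodup_keys_foldl_insert cves (fun _ _ => "") _ PySem.Dict.nodup_keys_empty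
  simp only [String.empty_append]
  congr 1
  apply List.map_congr_left
  intro c hc
  rw [pvOuter_getD _ _ hnd c (by rw [hkeys]; exact (PySem.Set.mem_ofList cves c).mpr hc)]
  rw [pvInit_getD cves PySem.Dict.empty c (by simp)]
  simp
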